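-- pv_equiv track=rewrite | github.com/victortch/tic-tac-toe | tic_tac_toe_victor6.py | transform_move
-- ===== SOURCE A (Python) =====
-- def rotate_move_left(move):
--     if move == 0: new_move = 6
--     elif move == 2: new_move = 0
--     elif move == 8: new_move = 2
--     elif move == 6: new_move = 8
--     elif move == 1: new_move = 3
--     elif move == 5: new_move = 1
--     elif move == 7: new_move = 5
--     elif move == 3:
--         new_move = 7
--     else:
--         new_move = 4
--     return new_move
--
-- def rotate_move_right(move):
--     if move == 6: new_move = 0
--     elif move == 0: new_move = 2
--     elif move == 2: new_move = 8
--     elif move == 8: new_move = 6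
--     elif move == 3: new_move = 1
--     elif move == 1: new_move = 5
--     elif move == 5: new_move = 7
--     elif move == 7:
--         new_move = 3
--     else:
--         new_move = 4
--     return new_move
--
-- def move_flip(move):
--     new_move = move
--     if move == 2: new_move = 0
--     if move == 5: new_move = 3
--     if move == 8: new_move = 6
--     if move == 0: new_move = 2
--     if move == 3: new_move = 5
--     if move == 6: new_move = 8
--     return new_move
--
-- def transform_move(move, rotations, direction = 'left', flip = False):
--
--     new_move = move
--     rotations = rotations % 4
--     if flip:
--             new_move = move_flip(new_move)
--     if rotations > 0:
--         if direction == 'left':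
--             for i in range(rotations):
--                 new_move = rotate_move_left(new_move)
--         else:
--             for i in range(rotations):
--                 new_move = rotate_move_right(new_move)
--
--     return new_move
-- ===== SOURCE B (Python) =====
-- _FLIP = {2: 0, 5: 3, 8: 6, 0: 2, 3: 5, 6: 8}
-- _CORNERS = [0, 6, 8, 2]   # one left rotation moves each entry to the next
-- _EDGES = [1, 3, 7, 5]
--
-- def transform_move(move, rotations, direction='left', flip=False):
--     m = _FLIP.get(move, move) if flip else move
--     r = rotations % 4
--     if r == 0:
--         return m
--     shift = r if direction == 'left' else -r
--     for cyc in (_CORNERS, _EDGES):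
--         if m in cyc:
--             return cyc[(cyc.index(m) + shift) % 4]
--     return 4
-- ===== Notes on version B (the rewrite author's own statement) =====
-- stated objective: alternative
-- what changed: Replaces the per-step rotate-left/rotate-right if-chain loops by cyclic-index arithmetic: the corner and edge rings are two 4-cycles, so one modular shift cycle[(i +/- rotations) % 4] replaces up to three rotation steps; the flip becomes a dict lookup.
import Mathlib
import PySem

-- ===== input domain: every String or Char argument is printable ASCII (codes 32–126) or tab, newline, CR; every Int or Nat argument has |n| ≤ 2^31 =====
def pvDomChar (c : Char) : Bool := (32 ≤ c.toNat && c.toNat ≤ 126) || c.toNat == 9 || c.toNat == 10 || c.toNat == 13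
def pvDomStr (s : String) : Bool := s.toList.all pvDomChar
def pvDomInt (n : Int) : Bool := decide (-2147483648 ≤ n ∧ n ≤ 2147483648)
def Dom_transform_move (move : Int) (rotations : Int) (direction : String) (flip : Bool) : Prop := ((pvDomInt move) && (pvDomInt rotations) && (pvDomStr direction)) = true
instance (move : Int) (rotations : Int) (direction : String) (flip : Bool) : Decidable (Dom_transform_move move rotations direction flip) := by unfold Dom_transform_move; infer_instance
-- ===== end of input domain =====

-- B replaces the per-step rotate-left/right if-chain loops by cyclic-index arithmetic on the two 4-cycles (alternative decomposition).


-- ===== PORT A =====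
def rotate_move_left (move : Int) : Int :=
  if move = 0 then 6
  else if move = 2 then 0
  else if move = 8 then 2
  else if move = 6 then 8
  else if move = 1 then 3
  else if move = 5 then 1
  else if move = 7 then 5
  else if move = 3 then 7
  else 4

def rotate_move_right (move : Int) : Int :=
  if move = 6 then 0
  else if move = 0 then 2
  else if move = 2 then 8
  else if move = 8 then 6
  else if move = 3 then 1
  else if move = 1 then 5
  else if move = 5 then 7
  else if move = 7 then 3
  else 4

def move_flip (move : Int) : Int :=
  let new_move := move
  let new_move := if move = 2 then (0:Int) else new_move
  let new_move := if move = 5 then 3 else new_move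
  let new_move := if move = 8 then 6 else new_move
  let new_move := if move = 0 then 2 else new_move
  let new_move := if move = 3 then 5 else new_move
  let new_move := if move = 6 then 8 else new_move
  new_move

def transform_move (move : Int) (rotations : Int) (direction : String) (flip : Bool) : Int :=
  let new_move := move
  let rotations := PySem.Int.mod rotations 4
  let new_move := if flip then move_flip new_move else new_move
  if rotations > 0 then
    if direction = "left" then
      (PySem.List.pyRange 0 rotations 1).foldl (fun nm _ => rotate_move_left nm) new_move
    else
      (PySem.List.pyRange 0 rotations 1).foldl (fun nm _ => rotate_move_right nm) new_move
  else new_move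

-- ===== PORT B =====
def pvFlipDict : PySem.Dict Int Int := PySem.Dict.ofList [(2,0),(5,3),(8,6),(0,2),(3,5),(6,8)]
def pvCorners : List Int := [0, 6, 8, 2]   -- one left rotation moves each entry to the next
def pvEdges : List Int := [1, 3, 7, 5]

-- Source B's for-loop over the two cycles, unrolled as it visits them: corners first, then edges
def pvCycleLookup (cyc : List Int) (m shift : Int) : Option Int :=
  match PySem.List.index? cyc m with
  | some i => some (PySem.List.pyGetD cyc (PySem.Int.mod ((i : Int) + shift) 4) 4)
  | none => none

def transform_move_alt (move : Int) (rotations : Int) (direction : String) (flip : Bool) : Int :=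
  let m := if flip then pvFlipDict.getD move move else move
  let r := PySem.Int.mod rotations 4
  if r = 0 then m
  else
    let shift := if direction = "left" then r else -r
    match pvCycleLookup pvCorners m shift with
    | some v => v
    | none =>
      match pvCycleLookup pvEdges m shift with
      | some v => v
      | none => 4

-- ===== PRECONDITION & SPEC =====
def Spec_transform_move (move : Int) (rotations : Int) (direction : String) (flip : Bool) (out : Int) : Prop := out = transform_move_alt move rotations direction flip
instance (move : Int) (rotations : Int) (direction : String) (flip : Bool) (out : Int) : Decidable (Spec_transform_move move rotations direction flip out) := by unfold Spec_transform_move; infer_instance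

-- ===== CLAIM (what is proved, stated in full; the proofs are below) =====
def Claim_equal_transform_move : Prop := ∀ (move : Int) (rotations : Int) (direction : String) (flip : Bool), Dom_transform_move move rotations direction flip → Spec_transform_move move rotations direction flip (transform_move move rotations direction flip)

-- ===== LEMMAS AND PROOFS =====

-- ===== VERDICT (by name: the statement is the Claim_ definition above) =====
set_option maxHeartbeats 4000000 in
theorem transform_move_spec : Claim_equal_transform_move := by
  intro move rotations direction flip _
  unfold Spec_transform_move
  have hn : 0 ≤ PySem.Int.mod rotations 4 := PySem.Int.mod_nonneg rotations (by norm_num)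
  have hl : PySem.Int.mod rotations 4 < 4 := PySem.Int.mod_lt rotations (by norm_num)
  simp only [transform_move, transform_move_alt]
  generalize hg : PySem.Int.mod rotations 4 = r
  rw [hg] at hn hl
  have hq : r = 0 ∨ r = 1 ∨ r = 2 ∨ r = 3 := by omega
  clear hg hn hl
  have e1 : PySem.List.pyRange 0 1 1 = [0] := by decide
  have e2 : PySem.List.pyRange 0 2 1 = [0, 1] := by decide
  have e3 : PySem.List.pyRange 0 3 1 = [0, 1, 2] := by decide
  by_cases hring : move = 0 ∨ move = 1 ∨ move = 2 ∨ move = 3 ∨ move = 5 ∨ move = 6 ∨ move = 7 ∨ move = 8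
  · rcases hring with hm|hm|hm|hm|hm|hm|hm|hm <;>
      subst hm <;>
      rcases hq with hq|hq|hq|hq <;>
      subst hq <;>
      cases flip <;>
      by_cases hd : direction = "left" <;>
      first
        | (subst hd; decide)
        | (simp only [if_neg hd]; decide)
  · push_neg at hring
    obtain ⟨n0, n1, n2, n3, n5, n6, n7, n8⟩ := hring
    have b0 : ((0:Int) == move) = false := by simp [Ne.symm n0]
    have c0 : ((move : Int) == 0) = false := by simp [n0]
    have b1 : ((1:Int) == move) = false := by simp [Ne.symm n1]
    have c1 : ((move : Int) == 1) = false := by simp [n1]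
    have b2 : ((2:Int) == move) = false := by simp [Ne.symm n2]
    have c2 : ((move : Int) == 2) = false := by simp [n2]
    have b3 : ((3:Int) == move) = false := by simp [Ne.symm n3]
    have c3 : ((move : Int) == 3) = false := by simp [n3]
    have b5 : ((5:Int) == move) = false := by simp [Ne.symm n5]
    have c5 : ((move : Int) == 5) = false := by simp [n5]
    have b6 : ((6:Int) == move) = false := by simp [Ne.symm n6]
    have c6 : ((move : Int) == 6) = false := by simp [n6]
    have b7 : ((7:Int) == move) = false := by simp [Ne.symm n7]
    have c7 : ((move : Int) == 7) = false := by simp [n7]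
    have b8 : ((8:Int) == move) = false := by simp [Ne.symm n8]
    have c8 : ((move : Int) == 8) = false := by simp [n8]
    rcases hq with hq|hq|hq|hq <;>
      subst hq <;>
      cases flip <;>
      by_cases hd : direction = "left" <;>
      (try subst hd) <;>
      simp [pvCycleLookup, move_flip, rotate_move_left, rotate_move_right,
        pvFlipDict, pvCorners, pvEdges, e1, e2, e3, *,
        b0, b1, b2, b3, b5, b6, b7, b8, c0, c1, c2, c3, c5, c6, c7, c8,
        Ne.symm n0, Ne.symm n1, Ne.symm n2, Ne.symm n3,
        Ne.symm n5, Ne.symm n6, Ne.symm n7, Ne.symm n8,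
        PySem.List.index?, List.idxOf?, List.findIdx?, List.findIdx?.go,
        PySem.List.pyGetD, PySem.List.pyGet?,
        PySem.Dict.getD, PySem.Dict.get?, PySem.Dict.ofList,
        PySem.Dict.empty, PySem.Dict.update, PySem.Dict.items, PySem.Dict.insert,
        PySem.Dict.contains, List.find?]
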